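-- pv_equiv track=rewrite | github.com/ZheruiWANG/SDP-for-VQE | More-Qubit Pro v3.0/SDPforVQE.py | generate_sub_PauliStrList
-- ===== SOURCE A (Python) =====
-- import itertools
-- from typing import TYPE_CHECKING, List, Dict, Any, Union, Iterable
--
-- def generate_sub_PauliStrList(N:int, index_list:List[int]) -> List[str]:
--     # Less-complexity version
--     ''' Given a index (list) of qubits, retrun the Pauli vectors of this sub system.
--     E.g.:
--         INPUT: PauliStrList=['III',...'ZZZ'], index=[0,2]
--         OUTPUT: ['III','IIX','IIY','IIZ','XII','XIX',...'ZIZ']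
--     '''
--     base_string = 'I' * N
--     output_strings = []
--
--     for combination in itertools.product('IXYZ', repeat=len(index_list)):
--         if all(c == 'I' for c in combination):
--             continue
--
--         temp_string = list(base_string)
--         for index, char in zip(index_list, combination):
--             temp_string[index] = char
--
--         output_strings.append(''.join(temp_string))
--
--     return output_strings
-- ===== SOURCE B (Python) =====
-- def generate_sub_PauliStrList(N, index_list):
--     # Base-4 counter instead of itertools.product: decode n = 1 .. 4**k - 1
--     # into big-endian base-4 digits mapped to 'IXYZ'; n = 0 (all identity) is skipped.
--     k = len(index_list)
--     chars = 'IXYZ'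
--     output_strings = []
--     for n in range(1, 4 ** k):
--         digits = []
--         m = n
--         for _ in range(k):
--             digits.append(chars[m % 4])
--             m //= 4
--         digits.reverse()
--         temp = ['I'] * N
--         for index, char in zip(index_list, digits):
--             temp[index] = char
--         output_strings.append(''.join(temp))
--     return output_strings
-- ===== Notes on version B (the rewrite author's own statement) =====
-- stated objective: alternative
-- what changed: Replaces itertools.product over 'IXYZ' with a base-4 counter n = 1 .. 4**k - 1 decoded into big-endian digits mapped to 'IXYZ', which also removes the all-identity filter test (n = 0 is simply never visited).
import Mathlib
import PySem

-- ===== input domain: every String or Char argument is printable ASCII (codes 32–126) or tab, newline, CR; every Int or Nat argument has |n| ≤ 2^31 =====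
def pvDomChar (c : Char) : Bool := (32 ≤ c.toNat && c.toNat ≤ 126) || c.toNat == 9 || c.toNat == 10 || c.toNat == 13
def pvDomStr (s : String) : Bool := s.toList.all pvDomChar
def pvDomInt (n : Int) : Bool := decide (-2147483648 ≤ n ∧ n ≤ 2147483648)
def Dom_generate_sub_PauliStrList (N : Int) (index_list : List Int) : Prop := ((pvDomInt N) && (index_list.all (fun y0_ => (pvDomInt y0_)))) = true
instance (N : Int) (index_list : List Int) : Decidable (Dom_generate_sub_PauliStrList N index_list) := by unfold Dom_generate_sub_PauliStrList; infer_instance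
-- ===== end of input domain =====

-- B replaces itertools.product by a base-4 counter n = 1 .. 4^k - 1 decoded into digits
-- (skipping the all-identity string n = 0); same return value, alternative decomposition.

-- ===== PORT A =====
-- itertools.product('IXYZ', repeat=k): first slot varies slowest
def pauliCombos : Nat → List (List Char)
  | 0 => [[]]
  | k + 1 => ['I', 'X', 'Y', 'Z'].flatMap (fun c => (pauliCombos k).map (fun t => c :: t))

def generate_sub_PauliStrList (N : Int) (index_list : List Int) : List String :=
  let base := List.replicate N.toNat 'I'
  ((pauliCombos index_list.length).filter (fun comb => !(comb.all (fun c => c == 'I')))).map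
    (fun comb =>
      String.mk ((index_list.zip comb).foldl (fun t p => PySem.List.pySetD t p.1 p.2) base))

-- ===== PORT B =====
-- the inner digit loop of Source B: little-endian base-4 digits of n mapped through 'IXYZ', then reversed
def pauliDigits (k : Nat) (n : Int) : List Char :=
  (((List.range k).foldl
      (fun (st : List Char × Int) _ =>
        (st.1 ++ [PySem.List.pyGetD ['I', 'X', 'Y', 'Z'] (PySem.Int.mod st.2 4) 'I'],
         PySem.Int.floordiv st.2 4))
      ([], n)).1).reverse

def generate_sub_PauliStrList_alt (N : Int) (index_list : List Int) : List String :=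
  let k := index_list.length
  (PySem.List.pyRange 1 ((4 : Int) ^ k) 1).map (fun n =>
    String.mk ((index_list.zip (pauliDigits k n)).foldl
      (fun t p => PySem.List.pySetD t p.1 p.2) (List.replicate N.toNat 'I')))

-- ===== PRECONDITION & SPEC =====
-- Pre_ excludes exactly the inputs on which A raises IndexError: an index outside
-- the Python range [-N, N) of the length-N list being written to.
def Pre_generate_sub_PauliStrList (N : Int) (index_list : List Int) : Prop :=
  ∀ i ∈ index_list, PySem.Raise.InRange N.toNat i
instance (N : Int) (index_list : List Int) : Decidable (Pre_generate_sub_PauliStrList N index_list) := by unfold Pre_generate_sub_PauliStrList; infer_instance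

def pvWitness_generate_sub_PauliStrList : Int × List Int := (3, [0, 2])

def Spec_generate_sub_PauliStrList (N : Int) (index_list : List Int) (out : List String) : Prop := out = generate_sub_PauliStrList_alt N index_list
instance (N : Int) (index_list : List Int) (out : List String) : Decidable (Spec_generate_sub_PauliStrList N index_list out) := by unfold Spec_generate_sub_PauliStrList; infer_instance

-- ===== CLAIM (what is proved, stated in full; the proofs are below) =====
def Claim_equal_generate_sub_PauliStrList : Prop := ∀ (N : Int) (index_list : List Int), Dom_generate_sub_PauliStrList N index_list → Pre_generate_sub_PauliStrList N index_list → Spec_generate_sub_PauliStrList N index_list (generate_sub_PauliStrList N index_list)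

-- ===== LEMMAS AND PROOFS =====

-- big-endian base-4 decoding (proof-side characterisation of both ports' combination lists)
def charOf (d : Nat) : Char := (['I', 'X', 'Y', 'Z']).getD d 'I'

def decodeBE : Nat → Nat → List Char
  | 0, _ => []
  | k + 1, n => charOf (n / 4 ^ k) :: decodeBE k (n % 4 ^ k)

-- little-endian decoding (what Source B's digit loop computes before the reverse)
def decodeLE : Nat → Nat → List Char
  | 0, _ => []
  | k + 1, n => charOf (n % 4) :: decodeLE k (n / 4)

theorem pow4_pos (k : Nat) : 0 < 4 ^ k := pow_pos (by norm_num) k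

theorem decodeBE_block (k j x : Nat) (hx : x < 4 ^ k) :
    decodeBE (k + 1) (j * 4 ^ k + x) = charOf j :: decodeBE k x := by
  simp only [decodeBE]
  have hcomm : j * 4 ^ k + x = x + 4 ^ k * j := by ring
  congr 1
  · congr 1
    rw [hcomm, Nat.add_mul_div_left _ _ (pow4_pos k), Nat.div_eq_of_lt hx, Nat.zero_add]
  · congr 1
    rw [hcomm, Nat.add_mul_mod_self_left, Nat.mod_eq_of_lt hx]

theorem combos_eq_map_range (k : Nat) :
    pauliCombos k = (List.range (4 ^ k)).map (decodeBE k) := by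
  induction k with
  | zero => simp [pauliCombos, decodeBE]
  | succ k ih =>
    have hsplit : (4 : Nat) ^ (k + 1) = 4 ^ k + (4 ^ k + (4 ^ k + 4 ^ k)) := by ring
    rw [hsplit, List.range_add, List.range_add, List.range_add]
    simp only [List.map_append, List.map_map, Function.comp_def]
    have block : ∀ j : Nat, ∀ f : Nat → List Char,
        (∀ x, x < 4 ^ k → f x = decodeBE (k + 1) (j * 4 ^ k + x)) →
        (List.range (4 ^ k)).map f = (pauliCombos k).map (fun t => charOf j :: t) := by
      intro j f hf
      rw [ih, List.map_map]
      apply List.map_congr_left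
      intro x hx
      have hx' := List.mem_range.mp hx
      rw [hf x hx', decodeBE_block k j x hx']
      rfl
    rw [block 0 (decodeBE (k + 1)) (by intro x _; norm_num),
        block 1 (fun x => decodeBE (k + 1) (4 ^ k + x)) (by intro x _; norm_num),
        block 2 (fun x => decodeBE (k + 1) (4 ^ k + (4 ^ k + x)))
          (by intro x _; exact congrArg (decodeBE (k + 1)) (by ring)),
        block 3 (fun x => decodeBE (k + 1) (4 ^ k + (4 ^ k + (4 ^ k + x))))
          (by intro x _; exact congrArg (decodeBE (k + 1)) (by ring))]
    simp [pauliCombos, List.flatMap, charOf]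

theorem decodeBE_zero (k : Nat) : decodeBE k 0 = List.replicate k 'I' := by
  induction k with
  | zero => rfl
  | succ k ih => simp [decodeBE, Nat.zero_div, Nat.zero_mod, ih, charOf, List.replicate_succ]

theorem decodeBE_all_I {k n : Nat} (hn : n < 4 ^ k) (hne : n ≠ 0) :
    (decodeBE k n).all (fun c => c == 'I') = false := by
  induction k generalizing n with
  | zero => simp [pow_zero] at hn; omega
  | succ k ih =>
    simp only [decodeBE, List.all_cons, Bool.and_eq_false_iff]
    by_cases h : n / 4 ^ k = 0
    · right
      apply ih
      · exact Nat.mod_lt _ (pow4_pos k)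
      · have hdm := Nat.div_add_mod n (4 ^ k)
        rw [h, Nat.mul_zero, Nat.zero_add] at hdm
        omega
    · left
      have h4 : n / 4 ^ k < 4 := by
        rw [Nat.div_lt_iff_lt_mul (pow4_pos k)]
        calc n < 4 ^ (k + 1) := hn
        _ = 4 * 4 ^ k := by ring
      generalize hgen : n / 4 ^ k = d at h h4
      have : d = 1 ∨ d = 2 ∨ d = 3 := by omega
      rcases this with h' | h' | h' <;> rw [h'] <;> decide

-- peeling the least-significant digit off the big-endian decoding
theorem decodeBE_succ_lsb (k : Nat) (n : Nat) (hn : n < 4 ^ (k + 1)) :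
    decodeBE (k + 1) n = decodeBE k (n / 4) ++ [charOf (n % 4)] := by
  induction k generalizing n with
  | zero =>
    simp only [decodeBE, pow_zero, Nat.div_one, List.nil_append]
    have : n < 4 := by simpa using hn
    rw [Nat.mod_eq_of_lt this]
  | succ k ih =>
    have hm : n % 4 ^ (k + 1) < 4 ^ (k + 1) := Nat.mod_lt _ (pow4_pos _)
    have step : decodeBE (k + 1 + 1) n =
        charOf (n / 4 ^ (k + 1)) :: decodeBE (k + 1) (n % 4 ^ (k + 1)) := rfl
    rw [step, ih _ hm]
    have d1 : n / 4 / 4 ^ k = n / 4 ^ (k + 1) := by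
      rw [Nat.div_div_eq_div_mul]; congr 1; ring
    have d2 : n % 4 ^ (k + 1) / 4 = n / 4 % 4 ^ k := by
      have h : (4 : Nat) ^ (k + 1) = 4 * 4 ^ k := by ring
      rw [h, Nat.mod_mul_right_div_self]
    have d3 : n % 4 ^ (k + 1) % 4 = n % 4 := by
      have h : (4 : Nat) ^ (k + 1) = 4 ^ k * 4 := by ring
      rw [h, Nat.mod_mul_left_mod]
    have step2 : decodeBE (k + 1) (n / 4) =
        charOf (n / 4 / 4 ^ k) :: decodeBE k (n / 4 % 4 ^ k) := rfl
    rw [d2, d3, step2, d1]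
    simp

theorem decodeLE_reverse (k : Nat) (n : Nat) (hn : n < 4 ^ k) :
    (decodeLE k n).reverse = decodeBE k n := by
  induction k generalizing n with
  | zero => rfl
  | succ k ih =>
    have hdiv : n / 4 < 4 ^ k := by
      rw [Nat.div_lt_iff_lt_mul (by norm_num)]
      calc n < 4 ^ (k + 1) := hn
      _ = 4 ^ k * 4 := by ring
    simp only [decodeLE, List.reverse_cons]
    rw [ih _ hdiv, decodeBE_succ_lsb k n hn]

-- Source B's digit loop computes decodeLE (for nonnegative n)
theorem pauliDigits_loop (k : Nat) :
    ∀ (acc : List Char) (m : Nat),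
      ((List.range k).foldl
        (fun (st : List Char × Int) _ =>
          (st.1 ++ [PySem.List.pyGetD ['I', 'X', 'Y', 'Z'] (PySem.Int.mod st.2 4) 'I'],
           PySem.Int.floordiv st.2 4)) (acc, (m : Int))) =
      (acc ++ decodeLE k m, ((m / 4 ^ k : Nat) : Int)) := by
  induction k with
  | zero => intro acc m; simp [decodeLE]
  | succ k ih =>
    intro acc m
    rw [List.range_succ_eq_map]
    simp only [List.foldl_cons, List.foldl_map]
    have hm : PySem.Int.mod (m : Int) 4 = ((m % 4 : Nat) : Int) := PySem.Int.mod_natCast m 4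
    have hd : PySem.Int.floordiv (m : Int) 4 = ((m / 4 : Nat) : Int) := PySem.Int.floordiv_natCast m 4
    rw [hm, hd, ih]
    simp only [Prod.mk.injEq]
    constructor
    · simp only [List.append_assoc, List.singleton_append, decodeLE]
      congr 2
      rw [PySem.List.pyGetD_natCast]
      rfl
    · norm_cast
      rw [Nat.div_div_eq_div_mul]
      congr 1
      ring

theorem pauliDigits_eq (k : Nat) (m : Nat) (hm : m < 4 ^ k) :
    pauliDigits k (m : Int) = decodeBE k m := by
  unfold pauliDigits
  rw [pauliDigits_loop k [] m]
  simp only [List.nil_append]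
  exact decodeLE_reverse k m hm

theorem range_filter_ne_zero (m : Nat) :
    (List.range (m + 1)).filter (fun n => n != 0) = (List.range m).map (· + 1) := by
  induction m with
  | zero => decide
  | succ m ih =>
    rw [List.range_succ, List.filter_append, ih, List.range_succ, List.map_append]
    simp

-- ===== VERDICT (by name: the statement is the Claim_ definition above) =====
theorem generate_sub_PauliStrList_spec : Claim_equal_generate_sub_PauliStrList := by
  intro N index_list _ _
  unfold Spec_generate_sub_PauliStrList generate_sub_PauliStrList generate_sub_PauliStrList_alt
  simp only []
  set k := index_list.length with hk
  set build : List Char → String := fun comb =>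
    String.mk ((index_list.zip comb).foldl (fun t p => PySem.List.pySetD t p.1 p.2)
      (List.replicate N.toNat 'I')) with hbuild
  have hA : ((pauliCombos k).filter (fun comb => !(comb.all (fun c => c == 'I')))).map build
      = ((List.range (4 ^ k - 1)).map (· + 1)).map (fun n => build (decodeBE k n)) := by
    rw [combos_eq_map_range, List.filter_map]
    rw [← range_filter_ne_zero (4 ^ k - 1)]
    have hpos : 0 < 4 ^ k := pow4_pos k
    have h1 : 4 ^ k - 1 + 1 = 4 ^ k := by omega
    rw [h1, List.map_map]
    congr 1
    apply List.filter_congr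
    intro n hn
    have hn' : n < 4 ^ k := List.mem_range.mp hn
    simp only [Function.comp_def]
    by_cases h0 : n = 0
    · subst h0; simp [decodeBE_zero]
    · simp [decodeBE_all_I hn' h0, h0]
  rw [hA]
  rw [PySem.List.pyRange_one 1 ((4 : Int) ^ k)]
  have hcast : ((4 : Int) ^ k - 1).toNat = 4 ^ k - 1 := by
    have h : ((4 : Nat) ^ k : Int) = (4 : Int) ^ k := by push_cast; ring
    omega
  rw [hcast, List.map_map, List.map_map]
  apply List.map_congr_left
  intro m hm
  have hm' : m < 4 ^ k - 1 := List.mem_range.mp hm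
  have hpos : 0 < 4 ^ k := pow4_pos k
  simp only [Function.comp_def]
  have h1 : (1 : Int) + (m : Int) = ((m + 1 : Nat) : Int) := by push_cast; ring
  rw [h1, pauliDigits_eq k (m + 1) (by omega)]
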